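-- pv_equiv track=rewrite | github.com/evelynmitchell/Process_Software_Agents | src/asp/utils/github_sync.py | _infer_priority_from_labels
-- ===== SOURCE A (Python) =====
-- def _infer_priority_from_labels(labels: list[str]) -> int:
--     """Infer priority from GitHub labels."""
--     labels_lower = [label.lower() for label in labels]
--
--     if "priority-critical" in labels_lower or "p0" in labels_lower:
--         return 0
--     elif "priority-high" in labels_lower or "p1" in labels_lower:
--         return 1
--     elif "priority-low" in labels_lower or "p3" in labels_lower:
--         return 3
--     else:
--         return 2  # Default medium
-- ===== SOURCE B (Python) =====
-- _PRIORITY_BY_LABEL = {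
--     "priority-critical": 0,
--     "p0": 0,
--     "priority-high": 1,
--     "p1": 1,
--     "priority-low": 3,
--     "p3": 3,
-- }
--
--
-- def _infer_priority_from_labels(labels: list[str]) -> int:
--     """Infer priority from GitHub labels."""
--     found = [
--         _PRIORITY_BY_LABEL[key]
--         for key in (label.lower() for label in labels)
--         if key in _PRIORITY_BY_LABEL
--     ]
--     return min(found) if found else 2
-- ===== Notes on version B (the rewrite author's own statement) =====
-- stated objective: idiomatic
-- what changed: Replaces the ordered if/elif chain of six membership scans over the lowered list with one pass that maps each lowered label through a priority table and returns the minimum collected priority (default 2 when none matches); correct because the branch precedence equals the numeric order of the priorities.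
import Mathlib
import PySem

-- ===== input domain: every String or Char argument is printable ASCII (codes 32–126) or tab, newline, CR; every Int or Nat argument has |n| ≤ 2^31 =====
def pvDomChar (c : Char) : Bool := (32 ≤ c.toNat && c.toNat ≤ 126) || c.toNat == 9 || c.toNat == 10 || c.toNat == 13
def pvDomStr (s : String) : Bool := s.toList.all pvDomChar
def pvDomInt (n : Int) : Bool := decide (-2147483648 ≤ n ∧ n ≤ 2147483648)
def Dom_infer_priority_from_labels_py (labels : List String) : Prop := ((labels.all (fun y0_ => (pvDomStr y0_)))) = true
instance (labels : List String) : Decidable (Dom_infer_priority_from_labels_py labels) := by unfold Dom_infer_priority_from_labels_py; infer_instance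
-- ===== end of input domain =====

-- B replaces A's ordered if/elif chain of six membership scans by one table-lookup pass plus
-- a numeric minimum (default 2 when nothing matches): a more idiomatic decomposition, same cost.

-- ===== PORT A =====
def infer_priority_from_labels_py (labels : List String) : Int :=
  let labels_lower := labels.map (fun label => PySem.Str.lower label)
  if "priority-critical" ∈ labels_lower ∨ "p0" ∈ labels_lower then 0
  else if "priority-high" ∈ labels_lower ∨ "p1" ∈ labels_lower then 1
  else if "priority-low" ∈ labels_lower ∨ "p3" ∈ labels_lower then 3
  else 2

-- ===== PORT B =====
def pvPriorityByLabel : PySem.Dict String Int :=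
  PySem.Dict.ofList [("priority-critical", 0), ("p0", 0), ("priority-high", 1),
                     ("p1", 1), ("priority-low", 3), ("p3", 3)]

def infer_priority_from_labels_py_alt (labels : List String) : Int :=
  let found := labels.filterMap (fun label => pvPriorityByLabel.get? (PySem.Str.lower label))
  match found with
  | [] => 2
  | h :: t => t.foldl min h

-- ===== PRECONDITION & SPEC =====
def Spec_infer_priority_from_labels_py (labels : List String) (out : Int) : Prop := out = infer_priority_from_labels_py_alt labels
instance (labels : List String) (out : Int) : Decidable (Spec_infer_priority_from_labels_py labels out) := by unfold Spec_infer_priority_from_labels_py; infer_instance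

-- ===== CLAIM (what is proved, stated in full; the proofs are below) =====
def Claim_equal_infer_priority_from_labels_py : Prop := ∀ (labels : List String), Dom_infer_priority_from_labels_py labels → Spec_infer_priority_from_labels_py labels (infer_priority_from_labels_py labels)

-- ===== LEMMAS AND PROOFS =====

-- The table lookup, characterised as a predicate on the key.
theorem pv_table_mk : pvPriorityByLabel =
    PySem.Dict.mk [("priority-critical", 0), ("p0", 0), ("priority-high", 1),
                   ("p1", 1), ("priority-low", 3), ("p3", 3)] := by decide

theorem pv_get_eq (k : String) :
    pvPriorityByLabel.get? k =
      if k = "priority-critical" ∨ k = "p0" then some 0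
      else if k = "priority-high" ∨ k = "p1" then some 1
      else if k = "priority-low" ∨ k = "p3" then some 3
      else none := by
  rw [pv_table_mk]
  simp only [PySem.Dict.get?_mk_cons, beq_iff_eq]
  by_cases h1 : "priority-critical" = k <;> by_cases h2 : "p0" = k <;>
    by_cases h3 : "priority-high" = k <;> by_cases h4 : "p1" = k <;>
    by_cases h5 : "priority-low" = k <;> by_cases h6 : "p3" = k <;>
    simp_all [PySem.Dict.get?, eq_comm]

-- min-fold over a list of values drawn from {0,1,3} equals the branch order of A.
theorem pv_foldl_min (t : List Int) : ∀ (h : Int),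
    (∀ v ∈ h :: t, v = 0 ∨ v = 1 ∨ v = 3) →
    t.foldl min h = if (0 : Int) ∈ h :: t then 0 else if (1 : Int) ∈ h :: t then 1 else 3 := by
  induction t with
  | nil =>
    intro h hv
    rcases hv h (by simp) with h0 | h1 | h3 <;> subst_vars <;> simp
  | cons a t ih =>
    intro h hv
    have hh := hv h (by simp)
    have ha := hv a (by simp)
    have hm : ∀ v ∈ (min h a) :: t, v = 0 ∨ v = 1 ∨ v = 3 := by
      intro v hvmem
      rcases List.mem_cons.mp hvmem with hve | hvt
      · subst hve
        rcases hh with h' | h' | h' <;> rcases ha with a' | a' | a' <;>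
          subst_vars <;> norm_num
      · exact hv v (by simp [hvt])
    have := ih (min h a) hm
    simp only [List.foldl_cons, this]
    rcases hh with h' | h' | h' <;> rcases ha with a' | a' | a' <;> subst_vars <;>
      norm_num <;> simp [List.mem_cons] <;> tauto

theorem a_unfold (labels : List String) :
    infer_priority_from_labels_py labels =
      (let L := labels.map (fun label => PySem.Str.lower label)
       if "priority-critical" ∈ L ∨ "p0" ∈ L then (0 : Int)
       else if "priority-high" ∈ L ∨ "p1" ∈ L then 1
       else if "priority-low" ∈ L ∨ "p3" ∈ L then 3
       else 2) := rfl

theorem b_unfold (labels : List String) :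
    infer_priority_from_labels_py_alt labels =
      (match (labels.map (fun label => PySem.Str.lower label)).filterMap
          (fun k => pvPriorityByLabel.get? k) with
       | [] => (2 : Int)
       | h :: t => t.foldl min h) := by
  unfold infer_priority_from_labels_py_alt
  rw [List.filterMap_map]
  rfl

theorem infer_priority_core (labels : List String) :
    infer_priority_from_labels_py labels = infer_priority_from_labels_py_alt labels := by
  rw [a_unfold, b_unfold]
  generalize labels.map (fun label => PySem.Str.lower label) = L
  have hmem : ∀ v : Int, v ∈ L.filterMap (fun k => pvPriorityByLabel.get? k) ↔
      ∃ k ∈ L, pvPriorityByLabel.get? k = some v := by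
    intro v; simp [List.mem_filterMap]
  have h0 : ((0 : Int) ∈ L.filterMap (fun k => pvPriorityByLabel.get? k)) ↔
      ("priority-critical" ∈ L ∨ "p0" ∈ L) := by
    rw [hmem]
    constructor
    · rintro ⟨k, hk, hg⟩
      rw [pv_get_eq] at hg
      split_ifs at hg with c1 c2 c3 <;> simp_all
      rcases c1 with rfl | rfl
      · exact Or.inl hk
      · exact Or.inr hk
    · rintro (hk | hk) <;> exact ⟨_, hk, by rw [pv_get_eq]; simp⟩
  have h1 : ((1 : Int) ∈ L.filterMap (fun k => pvPriorityByLabel.get? k)) ↔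
      ("priority-high" ∈ L ∨ "p1" ∈ L) := by
    rw [hmem]
    constructor
    · rintro ⟨k, hk, hg⟩
      rw [pv_get_eq] at hg
      split_ifs at hg with c1 c2 c3 <;> simp_all
      rcases c2 with rfl | rfl
      · exact Or.inl hk
      · exact Or.inr hk
    · rintro (hk | hk) <;> exact ⟨_, hk, by rw [pv_get_eq]; decide⟩
  have h3 : ((3 : Int) ∈ L.filterMap (fun k => pvPriorityByLabel.get? k)) ↔
      ("priority-low" ∈ L ∨ "p3" ∈ L) := by
    rw [hmem]
    constructor
    · rintro ⟨k, hk, hg⟩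
      rw [pv_get_eq] at hg
      split_ifs at hg with c1 c2 c3 <;> simp_all
      rcases c3 with rfl | rfl
      · exact Or.inl hk
      · exact Or.inr hk
    · rintro (hk | hk) <;> exact ⟨_, hk, by rw [pv_get_eq]; decide⟩
  have hsub : ∀ v ∈ L.filterMap (fun k => pvPriorityByLabel.get? k),
      v = 0 ∨ v = 1 ∨ v = 3 := by
    intro v hv
    rcases (hmem v).mp hv with ⟨k, _, hg⟩
    rw [pv_get_eq] at hg
    split_ifs at hg <;> simp_all
  cases hf : L.filterMap (fun k => pvPriorityByLabel.get? k) with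
  | nil =>
    rw [hf] at h0 h1 h3
    simp only [List.not_mem_nil, false_iff, not_or] at h0 h1 h3
    simp [h0.1, h0.2, h1.1, h1.2, h3.1, h3.2]
  | cons h t =>
    rw [hf] at h0 h1 h3 hsub
    simp only
    rw [pv_foldl_min t h hsub]
    simp only [h0, h1, h3]
    by_cases c1 : "priority-critical" ∈ L ∨ "p0" ∈ L
    · simp [c1]
    · by_cases c2 : "priority-high" ∈ L ∨ "p1" ∈ L
      · simp [c1, c2]
      · by_cases c3 : "priority-low" ∈ L ∨ "p3" ∈ L
        · simp [c1, c2, c3]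
        · exfalso
          rcases hsub h (by simp) with rfl | rfl | rfl
          · exact c1 (h0.mp (by simp))
          · exact c2 (h1.mp (by simp))
          · exact c3 (h3.mp (by simp))

-- ===== VERDICT (by name: the statement is the Claim_ definition above) =====
theorem infer_priority_from_labels_py_spec : Claim_equal_infer_priority_from_labels_py := by
  intro labels _
  exact infer_priority_core labels
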